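-- pv_equiv track=rewrite | github.com/huaxuan250/GGParser2023 | implementation.py | organize_freq_threshold
-- ===== SOURCE A (Python) =====
-- def organize_freq_threshold(frequency, threshold):
--
--   candidates = []
--   for name, freq in frequency.items():
--     candidates.append([name, freq])
--
--   sorted_candidates = sorted(candidates, key=lambda x: x[1], reverse = True)
--
--   results = [sorted_candidates[0][0]]
--
--   for idx, candidate in enumerate(sorted_candidates):
--
--     if idx == 0:
--       continue
--
--     prev_name, prev_vote = sorted_candidates[idx-1]
--     curr_name, curr_vote = candidate
--
--     if (prev_vote - curr_vote) > threshold: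
--       break
--     else:
--       results.append(curr_name)
--
--   return results
-- ===== SOURCE B (Python) =====
-- def organize_freq_threshold(frequency, threshold):
--   # Lazy selection: repeatedly extract the highest-frequency remaining item
--   # (max is Python's first-maximal element, matching the stable sort's tie order)
--   # and stop as soon as the gap to the previous one exceeds the threshold.
--   remaining = list(frequency.items())
--   top = max(remaining, key=lambda kv: kv[1])
--   remaining.remove(top)
--   results = [top[0]]
--   prev_vote = top[1]
--   while remaining:
--     curr = max(remaining, key=lambda kv: kv[1])
--     if prev_vote - curr[1] > threshold:
--       break
--     remaining.remove(curr)
--     results.append(curr[0])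
--     prev_vote = curr[1]
--   return results
-- ===== Notes on version B (the rewrite author's own statement) =====
-- stated objective: alternative
-- what changed: Replaces full stable sort + indexed scan with a break flag by lazy selection: repeatedly extract the current maximum (Python's max = first maximal element, matching the stable sort's tie order) from the remaining items and stop as soon as the gap exceeds the threshold, so no full sort is performed and only the emitted prefix is ever ordered.
import Mathlib
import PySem

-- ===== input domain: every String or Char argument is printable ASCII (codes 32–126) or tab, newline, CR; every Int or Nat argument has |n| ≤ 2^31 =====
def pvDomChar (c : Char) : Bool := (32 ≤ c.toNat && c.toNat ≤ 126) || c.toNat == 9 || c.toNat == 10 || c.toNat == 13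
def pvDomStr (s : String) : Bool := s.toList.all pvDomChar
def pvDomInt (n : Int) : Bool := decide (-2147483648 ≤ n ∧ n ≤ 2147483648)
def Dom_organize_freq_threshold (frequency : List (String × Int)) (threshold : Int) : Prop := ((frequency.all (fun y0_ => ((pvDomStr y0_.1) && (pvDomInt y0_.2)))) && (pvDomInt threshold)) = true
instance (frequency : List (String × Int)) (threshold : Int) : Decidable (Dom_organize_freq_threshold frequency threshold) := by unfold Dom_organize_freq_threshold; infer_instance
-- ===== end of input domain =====

-- B replaces A's full stable sort + indexed break-flag scan by lazy selection (repeated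
-- extraction of the first maximal remaining item, stopping at the first gap > threshold).


-- ===== PORT A =====


def organize_freq_threshold (frequency : List (String × Int)) (threshold : Int) : List String :=
  let candidates := frequency.foldl (fun acc nf => acc ++ [(nf.1, nf.2)]) []
  let sorted_candidates := PySem.List.sorted candidates (fun x => x.2) true
  match PySem.List.pyGet? sorted_candidates 0 with
  | none => []
  | some c0 =>
    let r := sorted_candidates.zipIdx.foldl (fun st ic =>
        if st.2 then st
        else
          let candidate := ic.1
          let idx := ic.2
          if idx = 0 then st
          else
            match PySem.List.pyGet? sorted_candidates ((idx : Int) - 1) with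
            | none => st
            | some prev =>
              if prev.2 - candidate.2 > threshold then (st.1, true)
              else (st.1 ++ [candidate.1], st.2))
      ([c0.1], false)
    r.1


-- ===== PORT B =====

-- general fact cited by the port's decreasing_by (termination of the while loop)

lemma erase_length_lt {α : Type} [BEq α] [LawfulBEq α] {l : List α} {a : α} (h : a ∈ l) :
    (l.erase a).length < l.length := by
  rw [List.length_erase_of_mem h]
  have := List.length_pos_of_mem h
  omega


-- the while loop of Source B: max(remaining, key=…) is PySem.List.max? (first maximal element);
-- remaining.remove(curr) with curr ∈ remaining (from max) is exactly List.erase (first occurrence)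

def organize_freq_threshold_altGo (threshold prev : Int) (results : List String)
    (remaining : List (String × Int)) : List String :=
  match h : PySem.List.max? remaining (fun kv => kv.2) with
  | none => results
  | some curr =>
    if prev - curr.2 > threshold then results
    else organize_freq_threshold_altGo threshold curr.2 (results ++ [curr.1]) (remaining.erase curr)
termination_by remaining.length
decreasing_by
  exact erase_length_lt (PySem.List.max?_mem h)



def organize_freq_threshold_alt (frequency : List (String × Int)) (threshold : Int) : List String :=
  match PySem.List.max? frequency (fun kv => kv.2) with
  | none => []
  | some top => organize_freq_threshold_altGo threshold top.2 [top.1] (frequency.erase top)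


-- ===== PRECONDITION & SPEC =====
-- A raises IndexError on the empty dict, so frequency ≠ [] is required; the key-Nodup clause
-- excludes association lists that do not encode a Python dict at all (a Python dict cannot hold
-- a duplicate key: such lists collapse before A ever runs), not any input A accepts as a dict.
def Pre_organize_freq_threshold (frequency : List (String × Int)) (threshold : Int) : Prop :=
  frequency ≠ [] ∧ (frequency.map Prod.fst).Nodup
instance (frequency : List (String × Int)) (threshold : Int) : Decidable (Pre_organize_freq_threshold frequency threshold) := by unfold Pre_organize_freq_threshold; infer_instance

def pvWitness_organize_freq_threshold : (List (String × Int)) × Int := ([("a", 3), ("b", 2)], 5)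

def Spec_organize_freq_threshold (frequency : List (String × Int)) (threshold : Int) (out : List String) : Prop := out = organize_freq_threshold_alt frequency threshold
instance (frequency : List (String × Int)) (threshold : Int) (out : List String) : Decidable (Spec_organize_freq_threshold frequency threshold out) := by unfold Spec_organize_freq_threshold; infer_instance

-- ===== CLAIM (what is proved, stated in full; the proofs are below) =====
def Claim_equal_organize_freq_threshold : Prop := ∀ (frequency : List (String × Int)) (threshold : Int), Dom_organize_freq_threshold frequency threshold → Pre_organize_freq_threshold frequency threshold → Spec_organize_freq_threshold frequency threshold (organize_freq_threshold frequency threshold)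

-- ===== LEMMAS AND PROOFS =====


lemma maxfold_seed {α κ : Type} [LinearOrder κ] (key : α → κ) (xs : List α) (x : α) :
    xs.foldl (fun acc y =>
        match acc with
        | none => some y
        | some m => if key m < key y then some y else some m) (some x) =
      match PySem.List.max? xs key with
      | none => some x
      | some m => if key x < key m then some m else some x := by
  induction xs generalizing x with
  | nil => simp [PySem.List.max?]
  | cons y xs ih =>
    have hmax : PySem.List.max? (y :: xs) key =
        xs.foldl (fun acc z =>
          match acc with
          | none => some z
          | some m => if key m < key z then some z else some m) (some y) := rfl
    have hstep : (fun (acc : Option α) (z : α) =>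
        match acc with
        | none => some z
        | some m => if key m < key z then some z else some m) (some x) y
        = if key x < key y then some y else some x := rfl
    rw [hmax, ih y]
    simp only [List.foldl_cons]
    by_cases hxy : key x < key y
    · rw [if_pos hxy, ih y]
      rcases h : PySem.List.max? xs key with _ | m
      · simp [hxy]
      · by_cases hym : key y < key m
        · have hxm : key x < key m := lt_trans hxy hym
          simp [hym, hxm]
        · simp [hym, hxy]
    · rw [if_neg hxy, ih x]
      rcases h : PySem.List.max? xs key with _ | m
      · simp [hxy]
      · by_cases hym : key y < key m
        · simp [hym]
        · have hxm : ¬ key x < key m := fun hc => hxy (lt_of_lt_of_le hc (not_lt.mp hym))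
          simp [hym, hxm, hxy]



lemma max?_cons {α κ : Type} [LinearOrder κ] (key : α → κ) (x : α) (xs : List α) :
    PySem.List.max? (x :: xs) key =
      match PySem.List.max? xs key with
      | none => some x
      | some m => if key x < key m then some m else some x := by
  have h0 : PySem.List.max? (x :: xs) key =
      xs.foldl (fun acc y =>
        match acc with
        | none => some y
        | some m => if key m < key y then some y else some m) (some x) := rfl
  rw [h0, maxfold_seed]



lemma insert_comm {α κ : Type} [LinearOrder κ] (key : α → κ) (x y : α) (acc : List α) :
    PySem.List.insertBy (fun a b => decide (key b ≤ key a)) x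
        (PySem.List.insertBy (fun a b => decide (key b < key a)) y acc) =
      PySem.List.insertBy (fun a b => decide (key b < key a)) y
        (PySem.List.insertBy (fun a b => decide (key b ≤ key a)) x acc) := by
  induction acc with
  | nil =>
    simp only [PySem.List.insertBy]
    by_cases h1 : key y ≤ key x
    · simp [h1, not_lt.mpr h1]
    · simp [h1, not_le.mp h1]
  | cons h t ih =>
    by_cases h1 : key h < key y <;> by_cases h2 : key h ≤ key x
    · -- case 1
      by_cases h3 : key y ≤ key x
      · have h4 : ¬ key x < key y := not_lt.mpr h3
        simp [PySem.List.insertBy, h1, h2, h3, h4]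
      · have h4 : key x < key y := not_le.mp h3
        simp [PySem.List.insertBy, h1, h2, h3, h4]
    · -- case 2 : key x < key h < key y
      have h3 : ¬ key y ≤ key x := fun hc => h2 (le_of_lt (lt_of_lt_of_le h1 hc))
      simp [PySem.List.insertBy, h1, h2, h3]
    · -- case 3 : key y ≤ key h ≤ key x
      have h3 : key y ≤ key x := le_trans (not_lt.mp h1) h2
      have h4 : ¬ key x < key y := not_lt.mpr h3
      simp [PySem.List.insertBy, h1, h2, h4]
    · -- case 4
      simp [PySem.List.insertBy, h1, h2, ih]



lemma sorted_rev_foldl_comm {α κ : Type} [LinearOrder κ] (key : α → κ) (x : α) :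
    ∀ (xs : List α) (acc : List α),
    xs.foldl (fun acc z => PySem.List.insertBy (fun a b => decide (key b < key a)) z acc)
        (PySem.List.insertBy (fun a b => decide (key b ≤ key a)) x acc) =
      PySem.List.insertBy (fun a b => decide (key b ≤ key a)) x
        (xs.foldl (fun acc z => PySem.List.insertBy (fun a b => decide (key b < key a)) z acc) acc) := by
  intro xs
  induction xs with
  | nil => intro acc; rfl
  | cons y ys ih =>
    intro acc
    simp only [List.foldl_cons]
    rw [← insert_comm key x y acc, ih]



lemma sorted_rev_cons {α κ : Type} [LinearOrder κ] (key : α → κ) (x : α) (xs : List α) :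
    PySem.List.sorted (x :: xs) key true =
      PySem.List.insertBy (fun a b => decide (key b ≤ key a)) x (PySem.List.sorted xs key true) := by
  rw [PySem.List.sorted_rev_eq_foldl_insertBy, PySem.List.sorted_rev_eq_foldl_insertBy]
  simp only [List.foldl_cons]
  have h0 : PySem.List.insertBy (fun a b => decide (key b < key a)) x ([] : List α)
      = PySem.List.insertBy (fun a b => decide (key b ≤ key a)) x [] := rfl
  rw [h0, sorted_rev_foldl_comm]



lemma sorted_rev_sel {α κ : Type} [BEq α] [LawfulBEq α] [LinearOrder κ] (key : α → κ) :
    ∀ (xs : List α) (m : α), PySem.List.max? xs key = some m →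
    PySem.List.sorted xs key true = m :: PySem.List.sorted (xs.erase m) key true := by
  intro xs
  induction xs with
  | nil => intro m h; simp [PySem.List.max?] at h
  | cons x xs ih =>
    intro m h
    rw [max?_cons] at h
    rcases h' : PySem.List.max? xs key with _ | m'
    · rw [h'] at h
      have hx : x = m := by
        have h2 : (some x : Option α) = some m := h
        simpa using h2
      subst hx
      have hnil : xs = [] := (PySem.List.max?_eq_none_iff xs key).mp h'
      subst hnil
      simp [PySem.List.sorted, PySem.List.insertBy]
    · rw [h'] at h
      have h2 : (if key x < key m' then some m' else some x) = some m := h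
      by_cases hlt : key x < key m'
      · rw [if_pos hlt] at h2
        have hm : m' = m := by simpa using h2
        rw [hm] at h' hlt
        have hne : x ≠ m := fun hc => absurd hlt (by rw [hc]; exact lt_irrefl _)
        rw [sorted_rev_cons, ih m h']
        have hble : ¬ key m ≤ key x := not_le.mpr hlt
        have hstep : PySem.List.insertBy (fun a b => decide (key b ≤ key a)) x
            (m :: PySem.List.sorted (xs.erase m) key true)
            = m :: PySem.List.insertBy (fun a b => decide (key b ≤ key a)) x
              (PySem.List.sorted (xs.erase m) key true) := by
          simp [PySem.List.insertBy, hble]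
        rw [hstep, ← sorted_rev_cons]
        have herase : (x :: xs).erase m = x :: xs.erase m := by
          rw [List.erase_cons_tail]
          simp [hne]
        rw [herase]
      · rw [if_neg hlt] at h2
        have hm : x = m := by simpa using h2
        subst hm
        have herase : (x :: xs).erase x = xs := List.erase_cons_head x xs
        rw [herase, sorted_rev_cons]
        rcases hs : PySem.List.sorted xs key true with _ | ⟨hd, tl⟩
        · rfl
        · have hhd : hd ∈ xs := by
            rw [← PySem.List.mem_sorted (key := key) (rev := true), hs]
            exact List.mem_cons_self
          have hle : key hd ≤ key x := by
            have h1 := PySem.List.max?_isMax h' hd hhd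
            exact le_trans h1 (not_lt.mp hlt)
          simp [PySem.List.insertBy, hle]



def chain (threshold prev : Int) : List (String × Int) → List String
  | [] => []
  | c :: t => if prev - c.2 > threshold then [] else c.1 :: chain threshold c.2 t



lemma altGo_eq_chain (threshold : Int) : ∀ (n : Nat) (remaining : List (String × Int))
    (prev : Int) (results : List String), remaining.length ≤ n →
    organize_freq_threshold_altGo threshold prev results remaining =
      results ++ chain threshold prev (PySem.List.sorted remaining (fun kv => kv.2) true) := by
  intro n
  induction n with
  | zero =>
    intro remaining prev results hlen
    have : remaining = [] := List.eq_nil_of_length_eq_zero (Nat.le_zero.mp hlen)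
    subst this
    unfold organize_freq_threshold_altGo
    simp [PySem.List.max?, PySem.List.sorted, chain]
  | succ n ih =>
    intro remaining prev results hlen
    unfold organize_freq_threshold_altGo
    split
    · next h =>
      have : remaining = [] := (PySem.List.max?_eq_none_iff _ _).mp h
      subst this
      simp [PySem.List.sorted, chain]
    · next curr h =>
      rw [sorted_rev_sel _ _ _ h]
      simp only [chain]
      by_cases hgt : prev - curr.2 > threshold
      · simp [hgt]
      · have hmem := PySem.List.max?_mem h
        have hlt := erase_length_lt hmem
        rw [ih (remaining.erase curr) curr.2 (results ++ [curr.1]) (by omega)]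
        simp [hgt]



lemma aflag (threshold : Int) (S : List (String × Int)) :
    ∀ (l : List ((String × Int) × Nat)) (res : List String),
    l.foldl (fun st ic =>
        if st.2 then st
        else
          if ic.2 = 0 then st
          else
            match PySem.List.pyGet? S ((ic.2 : Int) - 1) with
            | none => st
            | some prev =>
              if prev.2 - ic.1.2 > threshold then (st.1, true)
              else (st.1 ++ [ic.1.1], st.2))
      (res, true) = (res, true) := by
  intro l
  induction l with
  | nil => intro res; rfl
  | cons x l ih => intro res; simpa using ih res



lemma afold (threshold : Int) (S : List (String × Int)) :
    ∀ (suf : List (String × Int)) (k : Nat) (res : List String) (p : String × Int),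
    1 ≤ k → S.drop k = suf → PySem.List.pyGet? S ((k : Int) - 1) = some p →
    ((suf.zipIdx k).foldl (fun st ic =>
        if st.2 then st
        else
          if ic.2 = 0 then st
          else
            match PySem.List.pyGet? S ((ic.2 : Int) - 1) with
            | none => st
            | some prev =>
              if prev.2 - ic.1.2 > threshold then (st.1, true)
              else (st.1 ++ [ic.1.1], st.2))
      (res, false)).1 = res ++ chain threshold p.2 suf := by
  intro suf
  induction suf with
  | nil => intro k res p _ _ _; simp [chain]
  | cons c t ih =>
    intro k res p hk hdrop hget
    have hkne : ¬ k = 0 := by omega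
    have hlen : k < S.length := by
      have := congrArg List.length hdrop
      simp [List.length_drop] at this; omega
    have hSk : S[k]'hlen = c := by
      have h2 : (S.drop k)[0]'(by simp [hdrop]) = c := by simp [hdrop]
      simpa using h2
    have hdrop' : S.drop (k + 1) = t := by
      rw [← List.drop_drop, hdrop]; rfl
    have hget' : PySem.List.pyGet? S (((k + 1 : Nat) : Int) - 1) = some c := by
      have : ((k + 1 : Nat) : Int) - 1 = ((k : Nat) : Int) := by push_cast; ring
      rw [this, PySem.List.pyGet?_natCast]
      simp [List.getElem?_eq_getElem hlen, hSk]
    rw [List.zipIdx_cons, List.foldl_cons]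
    by_cases hgt : p.2 - c.2 > threshold
    · simp only [chain, if_pos hgt]
      have hstep : (if (false : Bool) then ((res, false) : List String × Bool)
          else
            if k = 0 then (res, false)
            else
              match PySem.List.pyGet? S ((k : Int) - 1) with
              | none => (res, false)
              | some prev =>
                if prev.2 - c.2 > threshold then (res, true)
                else (res ++ [c.1], false)) = (res, true) := by
        simp [hkne, hget, hgt]
      simp only [hstep]
      rw [aflag]
      simp
    · simp only [chain, if_neg hgt]
      have hstep : (if (false : Bool) then ((res, false) : List String × Bool)
          else
            if k = 0 then (res, false)
            else
              match PySem.List.pyGet? S ((k : Int) - 1) with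
              | none => (res, false)
              | some prev =>
                if prev.2 - c.2 > threshold then (res, true)
                else (res ++ [c.1], false)) = (res ++ [c.1], false) := by
        simp [hkne, hget, hgt]
      simp only [hstep]
      rw [ih (k + 1) (res ++ [c.1]) c (by omega) hdrop' hget']
      simp



theorem main_eq (frequency : List (String × Int)) (threshold : Int) (hne : frequency ≠ []) :
    organize_freq_threshold frequency threshold = organize_freq_threshold_alt frequency threshold := by
  rcases htop : PySem.List.max? frequency (fun kv => kv.2) with _ | top
  · exact absurd ((PySem.List.max?_eq_none_iff _ _).mp htop) hne
  · have hcand : frequency.foldl (fun acc nf => acc ++ [(nf.1, nf.2)]) ([] : List (String × Int))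
        = frequency := by
      rw [PySem.List.foldl_append_singleton_eq_map]
      simp
    have hS : PySem.List.sorted frequency (fun x => x.2) true
        = top :: PySem.List.sorted (frequency.erase top) (fun x => x.2) true :=
      sorted_rev_sel _ _ _ htop
    unfold organize_freq_threshold organize_freq_threshold_alt
    simp only [hcand, hS, htop]
    have hget0 : PySem.List.pyGet?
        (top :: PySem.List.sorted (frequency.erase top) (fun x => x.2) true) (0 : Int)
        = some top := by
      simp [PySem.List.pyGet?, PySem.List.pyIdx?]
    rw [hget0, List.zipIdx_cons]
    simp only [List.foldl_cons, Bool.false_eq_true, ite_false, ite_true]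
    have hget1 : PySem.List.pyGet?
        (top :: PySem.List.sorted (frequency.erase top) (fun x => x.2) true) (((1 : Nat) : Int) - 1)
        = some top := by
      have h1 : ((1 : Nat) : Int) - 1 = (0 : Int) := by norm_num
      rw [h1, hget0]
    rw [afold threshold (top :: PySem.List.sorted (frequency.erase top) (fun x => x.2) true)
      (PySem.List.sorted (frequency.erase top) (fun x => x.2) true) 1 [top.1] top
      (by omega) rfl hget1]
    rw [altGo_eq_chain threshold (frequency.erase top).length _ _ _ (le_refl _)]


-- ===== VERDICT (by name: the statement is the Claim_ definition above) =====
theorem organize_freq_threshold_spec : Claim_equal_organize_freq_threshold := by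
  intro frequency threshold _ hpre
  exact main_eq frequency threshold hpre.1
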